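-- pv_equiv track=rewrite | github.com/hanwool77/codingtest | 프로그래머스/lv1/92334. 신고 결과 받기/신고 결과 받기.py | solution
-- ===== SOURCE A (Python) =====
-- from collections import defaultdict
--
-- def solution(id_list, report, k):
--     answer = [0] * len(id_list)
--     report = list(set(report))
--     user = defaultdict(set) # user[x]: x가 신고한 사람
--     cnt = defaultdict(int)  # cnt[x]: x가 신고받은 수
--
--     for r in report:
--         a, b = r.split(" ") # a -> b에게 신고
--         user[a].add(b)
--         cnt[b] += 1
--
--     for i, id in enumerate(id_list):
--         for u in user[id]:
--             if cnt[u] >= k: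
--                 answer[i] += 1
--
--
--     return answer
-- ===== SOURCE B (Python) =====
-- from collections import Counter
--
-- def solution(id_list, report, k):
--     pairs = [r.split(" ") for r in set(report)]
--     cnt = Counter(b for _, b in pairs)
--     banned = {b for b, c in cnt.items() if c >= k}
--     score = Counter(a for a, b in pairs if b in banned)
--     return [score[i] for i in id_list]
-- ===== Notes on version B (the rewrite author's own statement) =====
-- stated objective: simpler
-- what changed: A groups reports into a per-reporter dict of sets and then, for each id, rescans that user's set against the count table; B makes two flat Counter passes over the deduplicated reports (count reportees, then count reporters of banned reportees) plus a banned set, and finishes with one dictionary lookup per id.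
import Mathlib
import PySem

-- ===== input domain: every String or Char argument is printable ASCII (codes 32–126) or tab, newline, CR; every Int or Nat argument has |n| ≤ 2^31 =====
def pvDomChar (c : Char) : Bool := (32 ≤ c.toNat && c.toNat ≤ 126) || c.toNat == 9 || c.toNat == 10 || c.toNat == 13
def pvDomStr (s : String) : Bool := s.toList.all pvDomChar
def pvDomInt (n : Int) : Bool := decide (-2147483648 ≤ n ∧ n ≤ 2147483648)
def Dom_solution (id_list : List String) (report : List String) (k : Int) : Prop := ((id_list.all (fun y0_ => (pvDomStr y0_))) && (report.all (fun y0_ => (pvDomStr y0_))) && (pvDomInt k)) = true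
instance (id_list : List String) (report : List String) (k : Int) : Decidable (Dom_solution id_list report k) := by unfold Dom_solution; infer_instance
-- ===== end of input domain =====

-- B replaces A's per-reporter dict of sets plus nested rescan by two flat Counter passes over the
-- deduplicated reports and a banned set, then one lookup per id (return value only; no mutation).

-- ===== PORT A =====
def solution (id_list : List String) (report : List String) (k : Int) : List Int :=
  let rep := PySem.Set.ofList report
  let st := rep.foldl (fun st r =>
      match (PySem.Str.split? r " ").getD [] with  -- a, b = r.split(" ")  (sep nonempty, so split? is `some`)
      | [a, b] => (st.1.modify a [] (fun s => PySem.Set.add s b), st.2.modify b 0 (· + 1))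
      | _ => st)  -- Python raises ValueError here; excluded by Pre_solution
    ((PySem.Dict.empty : PySem.Dict String (PySem.Set String)),
     (PySem.Dict.empty : PySem.Dict String Int))
  id_list.map (fun id =>
    (st.1.getD id []).foldl (fun acc u => if k ≤ st.2.getD u 0 then acc + 1 else acc) (0 : Int))

-- ===== PORT B =====
-- `a, b = r.split(" ")`-style unpacking of one report ("" padding is unreachable under Pre_solution)
def pairOf (r : String) : String × String :=
  let p := (PySem.Str.split? r " ").getD []
  (p.getD 0 "", p.getD 1 "")

def solution_alt (id_list : List String) (report : List String) (k : Int) : List Int :=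
  let pairs := (PySem.Set.ofList report).map pairOf
  let cnt := PySem.Dict.counter (pairs.map (fun p => p.2))
  let banned : PySem.Set String :=
    PySem.Set.ofList ((cnt.items.filter (fun p => k ≤ p.2)).map (fun p => p.1))
  let score := PySem.Dict.counter ((pairs.filter (fun p => banned.contains p.2)).map (fun p => p.1))
  id_list.map (fun i => score.getD i 0)

-- ===== PRECONDITION & SPEC =====
-- Pre_ excludes exactly the inputs where A raises ValueError (a report string that does not split
-- on " " into exactly two parts); B raises there too.
def Pre_solution (id_list : List String) (report : List String) (k : Int) : Prop :=
  ∀ r ∈ report, ((PySem.Str.split? r " ").getD []).length = 2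
instance (id_list : List String) (report : List String) (k : Int) : Decidable (Pre_solution id_list report k) := by unfold Pre_solution; infer_instance

def pvWitness_solution : List String × List String × Int :=
  (["muzi", "frodo", "apeach", "neo"],
   ["muzi frodo", "apeach frodo", "frodo neo", "muzi neo", "apeach muzi"], 2)

def Spec_solution (id_list : List String) (report : List String) (k : Int) (out : List Int) : Prop := out = solution_alt id_list report k
instance (id_list : List String) (report : List String) (k : Int) (out : List Int) : Decidable (Spec_solution id_list report k out) := by unfold Spec_solution; infer_instance

-- ===== CLAIM (what is proved, stated in full; the proofs are below) =====
def Claim_equal_solution : Prop := ∀ (id_list : List String) (report : List String) (k : Int), Dom_solution id_list report k → Pre_solution id_list report k → Spec_solution id_list report k (solution id_list report k)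

-- ===== LEMMAS AND PROOFS =====

-- A reference splitter equal to PySem.Chars.splitOn with separator [' ']
def mySplit (cur : List Char) : List Char → List (List Char)
  | [] => [cur]
  | c :: rest => if c = ' ' then cur :: mySplit [] rest else mySplit (cur ++ [c]) rest

lemma go_eq_mySplit : ∀ (fuel : Nat) (l cur : List Char) (acc : List (List Char)),
    l.length < fuel →
    PySem.Chars.splitOn.go [' '] fuel l cur acc = acc.reverse ++ mySplit cur.reverse l := by
  intro fuel
  induction fuel with
  | zero => intro l cur acc h; omega
  | succ n ih =>
    intro l cur acc h
    cases l with
    | nil => simp [PySem.Chars.splitOn.go, mySplit]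
    | cons c rest =>
      simp only [PySem.Chars.splitOn.go]
      by_cases hc : c = ' '
      · subst hc
        rw [if_pos (by simp [List.isPrefixOf])]
        rw [ih _ _ _ (by simp at h ⊢; omega)]
        simp [mySplit]
      · rw [if_neg (by simp [List.isPrefixOf]; exact fun hne => hc hne.symm)]
        rw [ih _ _ _ (by simp at h ⊢; omega)]
        simp [mySplit, hc]

lemma splitOn_eq_mySplit (s : List Char) :
    PySem.Chars.splitOn s [' '] = mySplit [] s := by
  unfold PySem.Chars.splitOn
  simpa using go_eq_mySplit (s.length + 1) s [] [] (by omega)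

lemma mySplit_ne_nil : ∀ (l cur : List Char), mySplit cur l ≠ [] := by
  intro l
  induction l with
  | nil => intro cur; simp [mySplit]
  | cons c rest ih => intro cur; by_cases hc : c = ' ' <;> simp [mySplit, hc, ih]

lemma mySplit_one : ∀ (l cur x : List Char), mySplit cur l = [x] → cur ++ l = x := by
  intro l
  induction l with
  | nil => intro cur x h; simpa [mySplit] using h
  | cons c rest ih =>
    intro cur x h
    by_cases hc : c = ' '
    · subst hc; simp [mySplit] at h
      exact absurd h.2 (mySplit_ne_nil rest [])
    · simp [mySplit, hc] at h
      have := ih _ _ h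
      simpa using this

lemma mySplit_two : ∀ (l cur a b : List Char), mySplit cur l = [a, b] → cur ++ l = a ++ ' ' :: b := by
  intro l
  induction l with
  | nil => intro cur a b h; simp [mySplit] at h
  | cons c rest ih =>
    intro cur a b h
    by_cases hc : c = ' '
    · subst hc
      simp [mySplit] at h
      obtain ⟨rfl, h2⟩ := h
      have := mySplit_one rest [] b h2
      simp at this
      simp [this]
    · simp [mySplit, hc] at h
      have := ih _ _ _ h
      simpa using this

lemma splitSp_two (r a b : String) (h : (PySem.Str.split? r " ").getD [] = [a, b]) :
    r.toList = a.toList ++ ' ' :: b.toList := by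
  simp [PySem.Str.split?, PySem.Chars.split?] at h
  rw [splitOn_eq_mySplit] at h
  rcases h' : mySplit [] r.toList with _ | ⟨x, _ | ⟨y, _ | _⟩⟩ <;> rw [h'] at h <;> simp at h
  obtain ⟨hx, hy⟩ := h
  have := mySplit_two r.toList [] x y h'
  simp at this
  rw [this, ← hx, ← hy, String.toList_ofList, String.toList_ofList]

lemma splitSp_len_two (r : String) (h : ((PySem.Str.split? r " ").getD []).length = 2) :
    ∃ a b, (PySem.Str.split? r " ").getD [] = [a, b] := by
  rcases h' : (PySem.Str.split? r " ").getD [] with _ | ⟨x, _ | ⟨y, _ | _⟩⟩ <;>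
    rw [h'] at h <;> simp at h
  exact ⟨x, y, rfl⟩

lemma pairOf_inj (r1 r2 : String) (h1 : ((PySem.Str.split? r1 " ").getD []).length = 2)
    (h2 : ((PySem.Str.split? r2 " ").getD []).length = 2)
    (h : pairOf r1 = pairOf r2) : r1 = r2 := by
  obtain ⟨a1, b1, e1⟩ := splitSp_len_two r1 h1
  obtain ⟨a2, b2, e2⟩ := splitSp_len_two r2 h2
  simp [pairOf, e1, e2] at h
  obtain ⟨rfl, rfl⟩ := h
  have t1 := splitSp_two r1 a1 b1 e1
  have t2 := splitSp_two r2 a1 b1 e2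
  exact String.toList_inj.mp (t1.trans t2.symm)

lemma getD_foldl_modify_setAdd (l : List (String × String)) (d : PySem.Dict String (PySem.Set String)) (a : String) :
    (l.foldl (fun d p => d.modify p.1 [] (fun s => PySem.Set.add s p.2)) d).getD a [] =
    PySem.Set.update (d.getD a []) ((l.filter (fun p => p.1 == a)).map (fun p => p.2)) := by
  induction l generalizing d with
  | nil => simp [PySem.Set.update]
  | cons p l ih =>
    simp only [List.foldl_cons, ih, List.filter_cons]
    by_cases hpa : p.1 = a
    · rw [if_pos (by simp [hpa])]
      simp only [List.map_cons, PySem.Set.update_cons]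
      rw [PySem.Dict.getD_modify, if_pos hpa.symm, hpa]
    · rw [if_neg (by simp [hpa])]
      rw [PySem.Dict.getD_modify, if_neg (fun hh => hpa hh.symm)]

lemma banned_contains (seconds : List String) (k : Int) (b : String) (hb : b ∈ seconds) :
    (PySem.Set.ofList ((((PySem.Dict.counter seconds).items).filter (fun p => k ≤ p.2)).map (fun p => p.1))).contains b
    = decide (k ≤ (seconds.count b : Int)) := by
  rw [PySem.Dict.items_counter, List.filter_map, List.map_map]
  simp only [Function.comp_def]
  rw [show (List.map (fun x => (x, (seconds.count x : Int)).1)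
        (List.filter (fun c => decide (k ≤ ((seconds.count c : Int))))
          (PySem.Set.ofList seconds)))
      = List.filter (fun c => decide (k ≤ ((seconds.count c : Int)))) (PySem.Set.ofList seconds) from by
    simp]
  have hnod : (List.filter (fun c => decide (k ≤ ((seconds.count c : Int)))) (PySem.Set.ofList seconds)).Nodup :=
    (PySem.Set.nodup_ofList seconds).filter _
  rw [PySem.Set.ofList_eq_self_of_nodup _ hnod]
  by_cases hk : k ≤ (seconds.count b : Int)
  · have hmem : b ∈ List.filter (fun c => decide (k ≤ ((seconds.count c : Int)))) (PySem.Set.ofList seconds) :=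
      List.mem_filter.mpr ⟨(PySem.Set.mem_ofList seconds b).mpr hb, by simp [hk]⟩
    rw [(PySem.Set.contains_iff _ _).mpr hmem]
    simp [hk]
  · have hnm : b ∉ List.filter (fun c => decide (k ≤ ((seconds.count c : Int)))) (PySem.Set.ofList seconds) := by
      intro hmem
      exact hk (by simpa using (List.mem_filter.mp hmem).2)
    have : (List.filter (fun c => decide (k ≤ ((seconds.count c : Int)))) (PySem.Set.ofList seconds)).contains b = false := by
      simpa using hnm
    rw [PySem.Set.contains_eq_listContains, this]
    simp [hk]

theorem solution_eq_alt (id_list report : List String) (k : Int)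
    (hpre : ∀ r ∈ report, ((PySem.Str.split? r " ").getD []).length = 2) :
    solution id_list report k = solution_alt id_list report k := by
  have hpre' : ∀ r ∈ PySem.Set.ofList report, ((PySem.Str.split? r " ").getD []).length = 2 :=
    fun r hr => hpre r ((PySem.Set.mem_ofList report r).1 hr)
  have hnp : (List.map pairOf (PySem.Set.ofList report)).Nodup :=
    List.Nodup.map_on
      (fun x hx y hy hxy => pairOf_inj x y (hpre' x hx) (hpre' y hy) hxy)
      (PySem.Set.nodup_ofList report)
  simp only [solution, solution_alt]
  have hstep : (PySem.Set.ofList report).foldl (fun st r =>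
      match (PySem.Str.split? r " ").getD [] with
      | [a, b] => (st.1.modify a [] (fun s => PySem.Set.add s b), st.2.modify b 0 (· + 1))
      | _ => st)
      ((PySem.Dict.empty : PySem.Dict String (PySem.Set String)),
       (PySem.Dict.empty : PySem.Dict String Int))
      = ((PySem.Set.ofList report).foldl
           (fun d r => d.modify (pairOf r).1 [] (fun s => PySem.Set.add s (pairOf r).2)) PySem.Dict.empty,
         (PySem.Set.ofList report).foldl
           (fun d r => d.modify (pairOf r).2 0 (· + 1)) PySem.Dict.empty) := by
    rw [PySem.List.foldl_congr_mem _ _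
        (fun st r => (st.1.modify (pairOf r).1 [] (fun s => PySem.Set.add s (pairOf r).2),
                      st.2.modify (pairOf r).2 0 (· + 1))) _
        (by
          intro acc r hr
          obtain ⟨a, b, e⟩ := splitSp_len_two r (hpre' r hr)
          rw [e]
          simp [pairOf, e])]
    exact PySem.List.foldl_prod_mk
      (fun (d : PySem.Dict String (PySem.Set String)) r => d.modify (pairOf r).1 [] (fun s => PySem.Set.add s (pairOf r).2))
      (fun (d : PySem.Dict String Int) r => d.modify (pairOf r).2 0 (· + 1)) _ _ _
  rw [hstep]
  apply List.map_congr_left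
  intro id _
  have huser : (PySem.Set.ofList report).foldl
      (fun d r => d.modify (pairOf r).1 [] (fun s => PySem.Set.add s (pairOf r).2)) PySem.Dict.empty
      = (List.map pairOf (PySem.Set.ofList report)).foldl
          (fun d p => d.modify p.1 [] (fun s => PySem.Set.add s p.2)) PySem.Dict.empty :=
    (List.foldl_map (f := pairOf)
      (g := fun (d : PySem.Dict String (PySem.Set String)) p => d.modify p.1 [] (fun s => PySem.Set.add s p.2))).symm
  have hcnt : (PySem.Set.ofList report).foldl
      (fun d r => d.modify (pairOf r).2 0 (· + 1)) PySem.Dict.empty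
      = PySem.Dict.counter ((List.map pairOf (PySem.Set.ofList report)).map (fun p => p.2)) := by
    rw [PySem.Dict.counter_eq_foldl, List.foldl_map, List.foldl_map]
  simp only
  rw [huser, hcnt, getD_foldl_modify_setAdd, PySem.Dict.getD_empty, PySem.Set.update_nil_left]
  rw [PySem.Dict.getD_counter]
  have hif : (fun (acc : Int) (u : String) =>
      if k ≤ (PySem.Dict.counter (List.map (fun p => p.2) (List.map pairOf (PySem.Set.ofList report)))).getD u 0 then acc + 1 else acc)
      = (fun acc u => if (fun u => decide (k ≤ (((List.map (fun p => p.2) (List.map pairOf (PySem.Set.ofList report))).count u : Int))) ) u = true then acc + 1 else acc) := by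
    funext acc u
    rw [PySem.Dict.getD_counter]
    simp
  rw [hif, PySem.List.foldl_count_if]
  have hnodS : (List.map (fun p => p.2) (List.filter (fun p => p.1 == id) (List.map pairOf (PySem.Set.ofList report)))).Nodup := by
    refine List.Nodup.map_on ?_ (hnp.filter _)
    intro x hx y hy hxy
    have hx' : x.1 = id := by simpa using (List.mem_filter.mp hx).2
    have hy' : y.1 = id := by simpa using (List.mem_filter.mp hy).2
    exact Prod.ext (hx'.trans hy'.symm) hxy
  rw [PySem.Set.ofList_eq_self_of_nodup _ hnodS]
  rw [List.count_eq_countP, List.countP_map, List.countP_map, List.countP_filter, List.countP_filter]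
  rw [zero_add]
  refine congrArg Nat.cast (List.countP_congr ?_)
  intro p hp
  have hb := banned_contains (List.map (fun p => p.2) (List.map pairOf (PySem.Set.ofList report))) k p.2
      (by exact List.mem_map_of_mem hp)
  simp only [Function.comp_def]
  rw [hb]
  simp [Bool.and_comm]

-- ===== VERDICT (by name: the statement is the Claim_ definition above) =====
theorem solution_spec : Claim_equal_solution := by
  intro id_list report k _ hpre
  unfold Spec_solution
  exact solution_eq_alt id_list report k hpre
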